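-- pv_equiv track=rewrite | github.com/samue1miranda/primeiros-codigos | python/ex8.py | somatorio
-- ===== SOURCE A (Python) =====
-- def somatorio(num):
-- 	soma = 0
-- 	j = 1
-- 	for i in range(1, num + 1):
-- 		if((i%2)==0):
-- 			soma -= pow(i, j)
-- 		else:
-- 			soma += pow(i, j)
-- 		if(j<=2):
-- 			j += 1
-- 		else:
-- 			j = 1
-- 	return soma
-- ===== SOURCE B (Python) =====
-- def somatorio(num):
--     # O(1) closed form: terms have period 6 (sign has period 2, exponent period 3);
--     # each full block of 6 starting at 6k sums to -324*k^2 - 450*k - 171, and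
--     # summing that over k=0..q-1 gives an integer polynomial in q.
--     if num <= 0:
--         return 0
--     q, r = divmod(num, 6)
--     total = -54*q*(q-1)*(2*q-1) - 225*q*(q-1) - 171*q
--     base = 6*q
--     tail = [base+1, -(base+2)**2, (base+3)**3, -(base+4), (base+5)**2]
--     return total + sum(tail[:r])
-- ===== Notes on version B (the rewrite author's own statement) =====
-- stated objective: faster
-- what changed: B replaces A's O(n) loop (sign alternating, exponent cycling 1,2,3) by an O(1) closed form: the terms have period 6, each full block sums to a quadratic in the block index, summed in closed polynomial form, plus at most 5 explicit tail terms.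
import Mathlib
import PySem

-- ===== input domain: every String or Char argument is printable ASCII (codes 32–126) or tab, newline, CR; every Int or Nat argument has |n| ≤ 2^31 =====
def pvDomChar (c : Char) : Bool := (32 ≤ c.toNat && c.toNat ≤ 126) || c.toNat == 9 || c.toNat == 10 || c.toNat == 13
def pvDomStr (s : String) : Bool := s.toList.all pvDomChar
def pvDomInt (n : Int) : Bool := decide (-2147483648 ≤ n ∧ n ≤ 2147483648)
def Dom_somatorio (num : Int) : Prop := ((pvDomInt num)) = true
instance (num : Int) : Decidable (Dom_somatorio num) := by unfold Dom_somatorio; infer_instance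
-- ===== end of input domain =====

-- B is an O(1) closed form (period-6 grouping) replacing A's O(n) loop; equal on all ints.

-- ===== PORT A =====
-- loop body of A; the exponent j only ever holds 1, 2 or 3, so 'i ^ j.toNat' is exactly Python's pow(i, j)
def somaStep (st : Int × Int) (i : Int) : Int × Int :=
  ( if PySem.Int.mod i 2 = 0 then st.1 - i ^ st.2.toNat else st.1 + i ^ st.2.toNat,
    if st.2 ≤ 2 then st.2 + 1 else 1 )

def somatorio (num : Int) : Int :=
  ((PySem.List.pyRange 1 (num + 1) 1).foldl somaStep (0, 1)).1

-- ===== PORT B =====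
def somatorio_alt (num : Int) : Int :=
  if num ≤ 0 then 0
  else
    let q := PySem.Int.floordiv num 6
    let r := PySem.Int.mod num 6
    let total := -54*q*(q-1)*(2*q-1) - 225*q*(q-1) - 171*q
    let base := 6*q
    let tail : List Int := [base+1, -(base+2)^2, (base+3)^3, -(base+4), (base+5)^2]
    total + (PySem.List.slice tail none (some r)).sum

-- ===== PRECONDITION & SPEC =====
def Spec_somatorio (num : Int) (out : Int) : Prop := out = somatorio_alt num
instance (num : Int) (out : Int) : Decidable (Spec_somatorio num out) := by unfold Spec_somatorio; infer_instance

-- ===== CLAIM (what is proved, stated in full; the proofs are below) =====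
def Claim_equal_somatorio : Prop := ∀ (num : Int), Dom_somatorio num → Spec_somatorio num (somatorio num)

-- ===== LEMMAS AND PROOFS =====

-- the else-branch formula of B, valid for all num ≥ 0 (at num = 0 it also gives 0)
def altFormula (num : Int) : Int :=
  let q := PySem.Int.floordiv num 6
  let r := PySem.Int.mod num 6
  let total := -54*q*(q-1)*(2*q-1) - 225*q*(q-1) - 171*q
  let base := 6*q
  let tail : List Int := [base+1, -(base+2)^2, (base+3)^3, -(base+4), (base+5)^2]
  total + (PySem.List.slice tail none (some r)).sum

lemma alt_eq_formula (num : Int) (h : 0 ≤ num) : somatorio_alt num = altFormula num := by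
  rcases (show num = 0 ∨ 0 < num by omega) with h' | h'
  · subst h'; decide
  · simp [somatorio_alt, altFormula, not_le.mpr h']

lemma alt_nat (k : Nat) :
    somatorio_alt (k : Int) =
      -54*((k/6 : Nat):Int)*(((k/6 : Nat):Int)-1)*(2*((k/6 : Nat):Int)-1)
      - 225*((k/6 : Nat):Int)*(((k/6 : Nat):Int)-1) - 171*((k/6 : Nat):Int)
      + (PySem.List.slice
          ([6*((k/6 : Nat):Int)+1, -(6*((k/6 : Nat):Int)+2)^2, (6*((k/6 : Nat):Int)+3)^3,
            -(6*((k/6 : Nat):Int)+4), (6*((k/6 : Nat):Int)+5)^2] : List Int)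
          none (some ((k%6 : Nat):Int))).sum := by
  rw [alt_eq_formula _ (by positivity)]
  simp only [altFormula]
  rw [show PySem.Int.floordiv (k:Int) 6 = ((k/6 : Nat):Int) from by
        exact_mod_cast PySem.Int.floordiv_natCast k 6,
      show PySem.Int.mod (k:Int) 6 = ((k%6 : Nat):Int) from by
        exact_mod_cast PySem.Int.mod_natCast k 6]

lemma loop_inv (n : Nat) :
    (PySem.List.pyRange 1 ((n : Int) + 1) 1).foldl somaStep (0, 1) =
      (somatorio_alt (n : Int), ((n % 3 : Nat) : Int) + 1) := by
  induction n with
  | zero =>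
      rw [PySem.List.pyRange_one_eq_nil (by omega)]
      decide
  | succ n ih =>
      have hsplit : PySem.List.pyRange 1 ((↑(n+1) : Int) + 1) 1
          = PySem.List.pyRange 1 ((n : Int) + 1) 1 ++ [((n : Int) + 1)] := by
        push_cast
        exact PySem.List.pyRange_one_succ_right (by omega)
      rw [hsplit, List.foldl_append, ih]
      obtain ⟨m, r, hr, hn⟩ : ∃ m r, r < 6 ∧ n = 6 * m + r := ⟨n / 6, n % 6, by omega, by omega⟩
      subst hn
      interval_cases r
      · -- r = 0
        have hd : (6*m+0)/6 = m := by omega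
        have hm6 : (6*m+0)%6 = 0 := by omega
        have hd' : (6*m+0+1)/6 = m := by omega
        have hm6' : (6*m+0+1)%6 = 1 := by omega
        have h3 : (6*m+0)%3 = 0 := by omega
        have h3' : (6*m+0+1)%3 = 1 := by omega
        have hpar : PySem.Int.mod ((↑(6*m+0):Int)+1) 2 = 1 := by
          rw [PySem.Int.mod_eq_emod_of_pos (by omega)]; push_cast; omega
        simp only [List.foldl_cons, List.foldl_nil, somaStep, hpar, hd, hm6, hd', hm6', h3, h3']
        rw [alt_nat, alt_nat]
        simp only [hd, hm6, hd', hm6', h3, h3']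
        have t1 : Int.toNat 1 = 1 := rfl
        have t2 : Int.toNat 2 = 2 := rfl
        have t3 : Int.toNat 3 = 3 := rfl
        have t4 : Int.toNat 4 = 4 := rfl
        have t5 : Int.toNat 5 = 5 := rfl
        norm_num [PySem.List.slice, Prod.ext_iff, t1, t2, t3, t4, t5, List.take_succ_cons,
                  List.take_zero]
        all_goals push_cast
        all_goals ring
      · -- r = 1
        have hd : (6*m+1)/6 = m := by omega
        have hm6 : (6*m+1)%6 = 1 := by omega
        have hd' : (6*m+1+1)/6 = m := by omega
        have hm6' : (6*m+1+1)%6 = 2 := by omega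
        have h3 : (6*m+1)%3 = 1 := by omega
        have h3' : (6*m+1+1)%3 = 2 := by omega
        have hpar : PySem.Int.mod ((↑(6*m+1):Int)+1) 2 = 0 := by
          rw [PySem.Int.mod_eq_emod_of_pos (by omega)]; push_cast; omega
        simp only [List.foldl_cons, List.foldl_nil, somaStep, hpar, hd, hm6, hd', hm6', h3, h3']
        rw [alt_nat, alt_nat]
        simp only [hd, hm6, hd', hm6', h3, h3']
        have t1 : Int.toNat 1 = 1 := rfl
        have t2 : Int.toNat 2 = 2 := rfl
        have t3 : Int.toNat 3 = 3 := rfl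
        have t4 : Int.toNat 4 = 4 := rfl
        have t5 : Int.toNat 5 = 5 := rfl
        norm_num [PySem.List.slice, Prod.ext_iff, t1, t2, t3, t4, t5, List.take_succ_cons,
                  List.take_zero]
        all_goals push_cast
        all_goals ring
      · -- r = 2
        have hd : (6*m+2)/6 = m := by omega
        have hm6 : (6*m+2)%6 = 2 := by omega
        have hd' : (6*m+2+1)/6 = m := by omega
        have hm6' : (6*m+2+1)%6 = 3 := by omega
        have h3 : (6*m+2)%3 = 2 := by omega
        have h3' : (6*m+2+1)%3 = 0 := by omega
        have hpar : PySem.Int.mod ((↑(6*m+2):Int)+1) 2 = 1 := by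
          rw [PySem.Int.mod_eq_emod_of_pos (by omega)]; push_cast; omega
        simp only [List.foldl_cons, List.foldl_nil, somaStep, hpar, hd, hm6, hd', hm6', h3, h3']
        rw [alt_nat, alt_nat]
        simp only [hd, hm6, hd', hm6', h3, h3']
        have t1 : Int.toNat 1 = 1 := rfl
        have t2 : Int.toNat 2 = 2 := rfl
        have t3 : Int.toNat 3 = 3 := rfl
        have t4 : Int.toNat 4 = 4 := rfl
        have t5 : Int.toNat 5 = 5 := rfl
        norm_num [PySem.List.slice, Prod.ext_iff, t1, t2, t3, t4, t5, List.take_succ_cons,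
                  List.take_zero]
        all_goals push_cast
        all_goals ring
      · -- r = 3
        have hd : (6*m+3)/6 = m := by omega
        have hm6 : (6*m+3)%6 = 3 := by omega
        have hd' : (6*m+3+1)/6 = m := by omega
        have hm6' : (6*m+3+1)%6 = 4 := by omega
        have h3 : (6*m+3)%3 = 0 := by omega
        have h3' : (6*m+3+1)%3 = 1 := by omega
        have hpar : PySem.Int.mod ((↑(6*m+3):Int)+1) 2 = 0 := by
          rw [PySem.Int.mod_eq_emod_of_pos (by omega)]; push_cast; omega
        simp only [List.foldl_cons, List.foldl_nil, somaStep, hpar, hd, hm6, hd', hm6', h3, h3']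
        rw [alt_nat, alt_nat]
        simp only [hd, hm6, hd', hm6', h3, h3']
        have t1 : Int.toNat 1 = 1 := rfl
        have t2 : Int.toNat 2 = 2 := rfl
        have t3 : Int.toNat 3 = 3 := rfl
        have t4 : Int.toNat 4 = 4 := rfl
        have t5 : Int.toNat 5 = 5 := rfl
        norm_num [PySem.List.slice, Prod.ext_iff, t1, t2, t3, t4, t5, List.take_succ_cons,
                  List.take_zero]
        all_goals push_cast
        all_goals ring
      · -- r = 4
        have hd : (6*m+4)/6 = m := by omega
        have hm6 : (6*m+4)%6 = 4 := by omega
        have hd' : (6*m+4+1)/6 = m := by omega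
        have hm6' : (6*m+4+1)%6 = 5 := by omega
        have h3 : (6*m+4)%3 = 1 := by omega
        have h3' : (6*m+4+1)%3 = 2 := by omega
        have hpar : PySem.Int.mod ((↑(6*m+4):Int)+1) 2 = 1 := by
          rw [PySem.Int.mod_eq_emod_of_pos (by omega)]; push_cast; omega
        simp only [List.foldl_cons, List.foldl_nil, somaStep, hpar, hd, hm6, hd', hm6', h3, h3']
        rw [alt_nat, alt_nat]
        simp only [hd, hm6, hd', hm6', h3, h3']
        have t1 : Int.toNat 1 = 1 := rfl
        have t2 : Int.toNat 2 = 2 := rfl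
        have t3 : Int.toNat 3 = 3 := rfl
        have t4 : Int.toNat 4 = 4 := rfl
        have t5 : Int.toNat 5 = 5 := rfl
        norm_num [PySem.List.slice, Prod.ext_iff, t1, t2, t3, t4, t5, List.take_succ_cons,
                  List.take_zero]
        all_goals push_cast
        all_goals ring
      · -- r = 5
        have hd : (6*m+5)/6 = m := by omega
        have hm6 : (6*m+5)%6 = 5 := by omega
        have hd' : (6*m+5+1)/6 = m+1 := by omega
        have hm6' : (6*m+5+1)%6 = 0 := by omega
        have h3 : (6*m+5)%3 = 2 := by omega
        have h3' : (6*m+5+1)%3 = 0 := by omega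
        have hpar : PySem.Int.mod ((↑(6*m+5):Int)+1) 2 = 0 := by
          rw [PySem.Int.mod_eq_emod_of_pos (by omega)]; push_cast; omega
        simp only [List.foldl_cons, List.foldl_nil, somaStep, hpar, hd, hm6, hd', hm6', h3, h3']
        rw [alt_nat, alt_nat]
        simp only [hd, hm6, hd', hm6', h3, h3']
        have t1 : Int.toNat 1 = 1 := rfl
        have t2 : Int.toNat 2 = 2 := rfl
        have t3 : Int.toNat 3 = 3 := rfl
        have t4 : Int.toNat 4 = 4 := rfl
        have t5 : Int.toNat 5 = 5 := rfl
        norm_num [PySem.List.slice, Prod.ext_iff, t1, t2, t3, t4, t5, List.take_succ_cons,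
                  List.take_zero]
        all_goals push_cast
        all_goals ring

-- ===== VERDICT (by name: the statement is the Claim_ definition above) =====
theorem somatorio_spec : Claim_equal_somatorio := by
  intro num _
  unfold Spec_somatorio
  rcases (show num ≤ 0 ∨ 0 < num by omega) with h | h
  · rw [show somatorio num = 0 from by
        simp [somatorio, PySem.List.pyRange_one_eq_nil (show num + 1 ≤ 1 by omega)]]
    rcases lt_or_eq_of_le h with h' | h'
    · simp [somatorio_alt, h]
    · subst h'; decide
  · have : num = ((num.toNat : Nat) : Int) := by omega
    rw [this, somatorio, loop_inv]
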